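-- pv_equiv track=rewrite | github.com/tomiyee/tetris-python | models/tombot/main.py | get_max_height
-- ===== SOURCE A (Python) =====
-- def get_max_height(board):
--     """ Returns the maximum height"""
--     # dimensions of the board
--     rows = len(board)
--     cols = len(board[0])
--     heights = []
--     for c in range(cols):
--         col = [board[r][c] for r in range(rows)]
--         if 1 not in col:
--             heights.append(0)
--             continue
--         heights.append(rows - col.index(1))
--     return max(heights)
-- ===== SOURCE B (Python) =====
-- def get_max_height(board):
--     """ Returns the maximum height"""
--     # dimensions of the board
--     rows = len(board)
--     cols = len(board[0])
--     # scan rows top-down; the first row containing a filled cell decides the height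
--     for r in range(rows):
--         if 1 in board[r][:cols]:
--             return rows - r
--     return 0
-- ===== Notes on version B (the rewrite author's own statement) =====
-- stated objective: simpler
-- what changed: Instead of materialising every column, taking each column's first-1 index and maximising, B scans the rows top-down once and returns rows - r at the first row containing a 1 (0 if none); it builds no per-column lists and exits early at the topmost filled row.
import Mathlib
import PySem

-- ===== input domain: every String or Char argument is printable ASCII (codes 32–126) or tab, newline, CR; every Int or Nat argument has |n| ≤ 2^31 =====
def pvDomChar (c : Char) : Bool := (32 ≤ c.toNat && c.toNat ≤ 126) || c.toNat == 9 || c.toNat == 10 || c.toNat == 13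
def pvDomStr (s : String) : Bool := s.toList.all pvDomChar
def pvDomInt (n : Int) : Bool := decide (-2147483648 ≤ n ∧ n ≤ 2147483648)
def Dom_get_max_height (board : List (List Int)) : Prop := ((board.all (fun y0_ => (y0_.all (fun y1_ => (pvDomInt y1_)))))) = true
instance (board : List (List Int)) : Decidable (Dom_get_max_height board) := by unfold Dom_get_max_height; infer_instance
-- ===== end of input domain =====

-- B replaces A's per-column materialisation + per-column first-1 index + max by a single
-- top-down row scan returning rows - r at the first row with a 1 (objective: simpler).

-- ===== PORT A =====
def get_max_height (board : List (List Int)) : Int :=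
  let rows := board.length
  let cols := (PySem.List.pyGetD board 0 []).length  -- len(board[0]); exact where board ≠ [] (Pre_)
  let heights := (PySem.List.pyRange 0 (cols : Int) 1).map (fun c =>
    let col := (PySem.List.pyRange 0 (rows : Int) 1).map (fun r =>
      PySem.List.pyGetD (PySem.List.pyGetD board r []) c 0)  -- board[r][c]; in range under Pre_
    match PySem.List.index? col 1 with
    | none => (0 : Int)                                      -- 1 not in col
    | some i => (rows : Int) - (i : Int))                    -- rows - col.index(1)
  (PySem.List.max? heights (fun x => x)).getD 0              -- max(heights); nonempty under Pre_ (cols > 0)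

-- ===== PORT B =====
-- the 'for r in range(rows)' loop with early return; r is the running index, rows = len(board)
def altLoop (rows cols : Nat) : Nat → List (List Int) → Int
  | _, [] => 0                                               -- loop ended without a 1
  | r, row :: rest =>
    if (1 : Int) ∈ PySem.List.slice row none (some (cols : Int))  -- 1 in board[r][:cols]
    then (rows : Int) - (r : Int)
    else altLoop rows cols (r + 1) rest

def get_max_height_alt (board : List (List Int)) : Int :=
  let rows := board.length
  let cols := (PySem.List.pyGetD board 0 []).length  -- len(board[0]); exact where board ≠ [] (Pre_)
  altLoop rows cols 0 board

-- ===== PRECONDITION & SPEC =====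
-- Exactly the inputs where Python A returns: a non-empty board, a non-empty first row (else the
-- max of an empty heights list raises ValueError) and no row shorter than the first (else IndexError).
def Pre_get_max_height (board : List (List Int)) : Prop :=
  board ≠ [] ∧ 0 < board.headI.length ∧ ∀ row ∈ board, board.headI.length ≤ row.length
instance (board : List (List Int)) : Decidable (Pre_get_max_height board) := by
  unfold Pre_get_max_height; infer_instance
def pvWitness_get_max_height : List (List Int) := [[0, 1], [1, 0]]

def Spec_get_max_height (board : List (List Int)) (out : Int) : Prop := out = get_max_height_alt board
instance (board : List (List Int)) (out : Int) : Decidable (Spec_get_max_height board out) := by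
  unfold Spec_get_max_height; infer_instance

-- ===== CLAIM (what is proved, stated in full; the proofs are below) =====
def Claim_equal_get_max_height : Prop := ∀ (board : List (List Int)), Dom_get_max_height board → Pre_get_max_height board → Spec_get_max_height board (get_max_height board)

-- ===== LEMMAS AND PROOFS =====

-- the column predicate A's per-column index is the first hit of, and the row predicate of B's scan
def colPred (k : Nat) (row : List Int) : Bool := row.getD k 0 == 1
def rowPred (cols : Nat) (row : List Int) : Bool := decide ((1 : Int) ∈ row.take cols)

theorem getD_head (board : List (List Int)) (h : board ≠ []) :
    PySem.List.pyGetD board 0 [] = board.headI := by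
  cases board with
  | nil => exact absurd rfl h
  | cons a l => simp [PySem.List.pyGetD_zero_cons]

theorem map_range_getD (xs : List (List Int)) (d : List Int) :
    (List.range xs.length).map (fun i => xs.getD i d) = xs := by
  apply List.ext_getElem
  · simp
  · intro i h1 h2
    simp [List.getD_eq_getElem?_getD, List.getElem?_eq_getElem h2]

-- the column comprehension [board[r][c] for r in range(rows)] is the c-th entry of each row
theorem col_reduce (board : List (List Int)) (k : Nat) :
    (List.range board.length).map (fun r =>
      PySem.List.pyGetD (PySem.List.pyGetD board ((r : Nat) : Int) []) (k : Int) 0)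
    = board.map (fun row => row.getD k 0) := by
  simp only [PySem.List.pyGetD_natCast]
  rw [show (fun j => (board.getD j []).getD k 0)
        = (fun row => row.getD k 0) ∘ (fun j => board.getD j []) from rfl,
      ← List.map_map, map_range_getD]

theorem findIdx_le_of_pred (l : List (List Int)) (p : List Int → Bool) (i : Nat)
    (hi : i < l.length) (hp : p l[i]) : l.findIdx p ≤ i := by
  by_contra h
  exact absurd hp (by simpa using List.not_of_lt_findIdx (Nat.lt_of_not_le h))

-- A's per-column height '0 if 1 not in col else rows - col.index(1)' is rows - findIdx uniformly
theorem height_reduce (board : List (List Int)) (k : Nat) :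
    (match PySem.List.index? (board.map (fun row => row.getD k 0)) 1 with
     | none => (0 : Int)
     | some i => (board.length : Int) - (i : Int))
    = (board.length : Int) - (board.findIdx (colPred k) : Int) := by
  have hmap : (board.map (fun row => row.getD k 0)).findIdx (· == 1) = board.findIdx (colPred k) := by
    rw [List.findIdx_map]; rfl
  rcases h : PySem.List.index? (board.map (fun row => row.getD k 0)) 1 with _ | i <;> rw [h]
  · rw [PySem.List.index?_eq_none_iff] at h
    have : (board.map (fun row => row.getD k 0)).findIdx (· == 1)
        = (board.map (fun row => row.getD k 0)).length := by
      rw [List.findIdx_eq_length]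
      intro x hx
      simp only [beq_eq_false_iff_ne]
      intro e; exact h (e ▸ hx)
    rw [hmap] at this
    simp only [List.length_map] at this
    simp [this]
  · rw [PySem.List.index?_eq_idxOf?] at h
    unfold List.idxOf? at h
    have : (board.map (fun row => row.getD k 0)).findIdx (· == 1) = i :=
      (List.findIdx?_eq_some_iff_findIdx_eq.mp (by simpa using h)).2
    rw [hmap] at this
    simp [this]

-- B's loop returns rows - (r + findIdx) whenever r + len(tail) = rows (0 falls out as rows - rows)
theorem altLoop_eq (cols : Nat) (l : List (List Int)) (r rows : Nat)
    (h : r + l.length = rows) :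
    altLoop rows cols r l = (rows : Int) - ((r + l.findIdx (rowPred cols) : Nat) : Int) := by
  induction l generalizing r with
  | nil =>
    simp only [altLoop, List.findIdx_nil]
    simp at h; omega
  | cons row rest ih =>
    simp only [altLoop, PySem.List.slice_to_natCast, List.findIdx_cons]
    by_cases hp : (1 : Int) ∈ row.take cols
    · rw [if_pos hp]
      have : rowPred cols row = true := by simpa [rowPred]
      rw [this]
      simp
    · rw [if_neg hp]
      have hfalse : rowPred cols row = false := by simpa [rowPred]
      rw [hfalse]
      simp only [cond_false]
      rw [ih (r + 1) (by simp only [List.length_cons] at h; omega)]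
      congr 1
      push_cast
      ring

theorem main_eq (board : List (List Int)) (hne : board ≠ [])
    (hcols : 0 < board.headI.length)
    (hlen : ∀ row ∈ board, board.headI.length ≤ row.length) :
    get_max_height board = get_max_height_alt board := by
  set cols := board.headI.length with hc
  set rows := board.length with hr
  set F := board.findIdx (rowPred cols) with hF
  have hA : get_max_height board
      = (PySem.List.max? ((List.range cols).map
          (fun k => (rows : Int) - (board.findIdx (colPred k) : Int))) (fun x => x)).getD 0 := by
    show (PySem.List.max? ((PySem.List.pyRange 0 ((PySem.List.pyGetD board 0 []).length : Int) 1).map (fun c =>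
        match PySem.List.index? ((PySem.List.pyRange 0 ((board.length : Nat) : Int) 1).map (fun r =>
          PySem.List.pyGetD (PySem.List.pyGetD board r []) c 0)) 1 with
        | none => (0 : Int)
        | some i => ((board.length : Nat) : Int) - (i : Int))) (fun x => x)).getD 0 = _
    rw [getD_head board hne, PySem.List.pyRange_zero_natCast (n := board.headI.length),
        List.map_map]
    refine congrArg (fun l => (PySem.List.max? l (fun x => x)).getD 0) (List.map_congr_left ?_)
    intro k hk
    simp only [Function.comp_def]
    rw [PySem.List.pyRange_zero_natCast (n := board.length), List.map_map]
    simp only [Function.comp_def]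
    rw [col_reduce, height_reduce]
  have hB : get_max_height_alt board = (rows : Int) - (F : Int) := by
    show altLoop board.length (PySem.List.pyGetD board 0 []).length 0 board = _
    rw [getD_head board hne, altLoop_eq cols board 0 rows (by omega)]
    simp only [Nat.zero_add, ← hF]
  have hCle : ∀ k, board.findIdx (colPred k) ≤ rows := fun k => List.findIdx_le_length
  have h1 : ∀ k, k < cols → F ≤ board.findIdx (colPred k) := by
    intro k hk
    apply List.findIdx_le_findIdx
    intro row hrow hp
    have hklen : k < row.length := lt_of_lt_of_le hk (hlen row hrow)
    simp only [colPred, beq_iff_eq] at hp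
    rw [List.getD_eq_getElem?_getD, List.getElem?_eq_getElem hklen] at hp
    simp only [Option.getD_some] at hp
    simp only [rowPred, decide_eq_true_eq]
    have hkt : k < (row.take cols).length := by simp [List.length_take]; omega
    have heq : (row.take cols)[k] = row[k] := List.getElem_take
    rw [← hp, ← heq]
    exact List.getElem_mem hkt
  have h2 : ∃ k, k < cols ∧ board.findIdx (colPred k) ≤ F := by
    by_cases hFlt : F < board.length
    · have hp : rowPred cols (board[F]'hFlt) = true := List.findIdx_getElem (w := hFlt)
      simp only [rowPred, decide_eq_true_eq] at hp
      obtain ⟨k, hk, hke⟩ := List.mem_iff_getElem.mp hp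
      have hkc : k < cols := by simp [List.length_take] at hk; omega
      have hkr : k < (board[F]).length := by simp [List.length_take] at hk; omega
      refine ⟨k, hkc, ?_⟩
      apply findIdx_le_of_pred _ _ F hFlt
      simp only [colPred, beq_iff_eq]
      rw [List.getD_eq_getElem?_getD, List.getElem?_eq_getElem hkr]
      simp only [Option.getD_some]
      rw [← List.getElem_take (h := hk)]
      exact hke
    · exact ⟨0, hcols, le_trans (hCle 0) (by omega)⟩
  rw [hA, hB]
  set hs := (List.range cols).map (fun k => (rows : Int) - (board.findIdx (colPred k) : Int)) with hhs
  have hne' : hs ≠ [] := by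
    simp only [hhs, ne_eq, List.map_eq_nil_iff, List.range_eq_nil]
    omega
  rcases hm : PySem.List.max? hs (fun x => x) with _ | m
  · exact absurd ((PySem.List.max?_eq_none_iff hs (fun x => x)).mp hm) hne'
  · simp only [Option.getD_some]
    have hmem := PySem.List.max?_mem hm
    have hmax := PySem.List.max?_isMax hm
    rw [hhs] at hmem
    obtain ⟨k1, hk1, hk1e⟩ := List.mem_map.mp hmem
    obtain ⟨k0, hk0c, hk0F⟩ := h2
    have hy0 : (rows : Int) - (board.findIdx (colPred k0) : Int) ∈ hs := by
      rw [hhs]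
      exact List.mem_map.mpr ⟨k0, List.mem_range.mpr hk0c, rfl⟩
    have hle0 := hmax _ hy0
    have hb1 := h1 k1 (List.mem_range.mp hk1)
    have c0 := hCle k0
    have c1 := hCle k1
    simp only at hle0
    omega

-- ===== VERDICT (by name: the statement is the Claim_ definition above) =====
theorem get_max_height_spec : Claim_equal_get_max_height := by
  intro board _ hpre
  obtain ⟨hne, hcols, hlen⟩ := hpre
  unfold Spec_get_max_height
  exact main_eq board hne hcols hlen
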